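-- pv_equiv track=rewrite | github.com/lowRISC/opentitan | hw/ip/rom_ctrl/util/gen_vivado_mem_image.py | swap_bytes
-- ===== SOURCE A (Python) =====
-- import math
--
-- def swap_bytes(width: int, orig: int, swap_nibbles: bool) -> int:
--     num_bytes = math.ceil(width / 8)
--     swapped = 0
--     for i in range(num_bytes):
--         byte_value = ((orig >> (i * 8)) & 0xFF)
--         if swap_nibbles:
--             byte_value = ((byte_value << 4) | (byte_value >> 4)) & 0xFF
--         swapped |= (byte_value << ((num_bytes - i - 1) * 8))
--     return swapped
-- ===== SOURCE B (Python) =====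
-- _NIBBLE = bytes(((b << 4) | (b >> 4)) & 0xFF for b in range(256))
--
-- def swap_bytes(width: int, orig: int, swap_nibbles: bool) -> int:
--     num_bytes = -(-width // 8)          # integer ceil(width / 8)
--     if num_bytes <= 0:
--         return 0
--     buf = (orig & ((1 << (8 * num_bytes)) - 1)).to_bytes(num_bytes, 'little')[::-1]
--     if swap_nibbles:
--         buf = buf.translate(_NIBBLE)
--     return int.from_bytes(buf, 'little')
-- ===== Notes on version B (the rewrite author's own statement) =====
-- stated objective: idiomatic
-- what changed: Replaced the per-byte shift-and-or accumulation loop by masking orig to num_bytes*8 bits, serialising it with to_bytes(..., 'little'), reversing the buffer, nibble-swapping via a precomputed 256-entry bytes.translate table, and reading the result back with int.from_bytes.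
import Mathlib
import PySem

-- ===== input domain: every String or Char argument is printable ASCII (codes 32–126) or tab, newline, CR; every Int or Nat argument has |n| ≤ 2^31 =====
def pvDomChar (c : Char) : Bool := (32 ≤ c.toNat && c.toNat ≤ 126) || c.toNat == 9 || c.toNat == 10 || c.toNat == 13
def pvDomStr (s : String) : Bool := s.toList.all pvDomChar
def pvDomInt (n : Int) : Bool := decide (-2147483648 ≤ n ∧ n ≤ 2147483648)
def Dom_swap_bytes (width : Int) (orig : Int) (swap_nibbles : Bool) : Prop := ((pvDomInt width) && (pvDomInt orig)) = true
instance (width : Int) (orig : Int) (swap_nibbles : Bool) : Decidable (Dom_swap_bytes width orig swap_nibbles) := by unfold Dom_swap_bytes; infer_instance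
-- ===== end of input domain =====

-- B replaces A's per-byte shift-and-or accumulation loop by building the little-endian
-- byte buffer, reversing it, optionally nibble-swapping each byte, and reading it back
-- (idiomatic bytes-buffer formulation; measurably faster in Python for large widths).

-- ===== PORT A =====
def swap_bytes (width : Int) (orig : Int) (swap_nibbles : Bool) : Int :=
  -- math.ceil(width / 8): the float division by 8 is exact for |width| ≤ 2^31, so this
  -- equals the integer ceiling division -((-width) // 8).
  let num_bytes : Int := -(PySem.Int.floordiv (-width) 8)
  (PySem.List.pyRange 0 num_bytes 1).foldl
    (fun swapped i =>
      let byte_value := PySem.Int.band (orig >>> (i * 8).toNat) 0xFF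
      let byte_value :=
        if swap_nibbles then
          PySem.Int.band (PySem.Int.bor (byte_value <<< (4 : Nat)) (byte_value >>> (4 : Nat))) 0xFF
        else byte_value
      PySem.Int.bor swapped (byte_value <<< ((num_bytes - i - 1) * 8).toNat)) 0

-- ===== PORT B =====
-- the 256-entry translate table of Source B, as the function it tabulates
def pvNibbleSwap (b : Int) : Int :=
  PySem.Int.band (PySem.Int.bor (b <<< (4 : Nat)) (b >>> (4 : Nat))) 0xFF

-- int.to_bytes(n, 'little') as a list of byte values, step for step
def pvToBytesLE : Nat → Int → List Int
  | 0, _ => []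
  | n + 1, m => PySem.Int.mod m 256 :: pvToBytesLE n (PySem.Int.floordiv m 256)

-- int.from_bytes(buf, 'little')
def pvFromBytesLE : List Int → Int
  | [] => 0
  | b :: bs => b + 256 * pvFromBytesLE bs

def swap_bytes_alt (width : Int) (orig : Int) (swap_nibbles : Bool) : Int :=
  let num_bytes : Int := -(PySem.Int.floordiv (-width) 8)
  if num_bytes ≤ 0 then 0
  else
    let masked := PySem.Int.band orig (((1 : Int) <<< (8 * num_bytes).toNat) - 1)
    let buf := (pvToBytesLE num_bytes.toNat masked).reverse
    let buf := if swap_nibbles then buf.map pvNibbleSwap else buf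
    pvFromBytesLE buf

-- ===== PRECONDITION & SPEC =====
def Spec_swap_bytes (width : Int) (orig : Int) (swap_nibbles : Bool) (out : Int) : Prop := out = swap_bytes_alt width orig swap_nibbles
instance (width : Int) (orig : Int) (swap_nibbles : Bool) (out : Int) : Decidable (Spec_swap_bytes width orig swap_nibbles out) := by unfold Spec_swap_bytes; infer_instance

-- ===== CLAIM (what is proved, stated in full; the proofs are below) =====
def Claim_equal_swap_bytes : Prop := ∀ (width : Int) (orig : Int) (swap_nibbles : Bool), Dom_swap_bytes width orig swap_nibbles → Spec_swap_bytes width orig swap_nibbles (swap_bytes width orig swap_nibbles)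

-- ===== LEMMAS AND PROOFS =====

-- the big-endian byte sum both programs compute, with g the per-byte transform
def pvS (g : Int → Int) : Nat → Int → Int
  | 0, _ => 0
  | n + 1, m => g (m % 256) * 256 ^ n + pvS g n (m / 256)

-- Python '&' with an all-ones mask is emod
theorem pv_band_mask (a : Int) (k : Nat) :
    PySem.Int.band a ((2 : Int) ^ k - 1) = a % (2 : Int) ^ k := by
  have hpow : (0 : Int) < 2 ^ k := by positivity
  have hcast : ((2 ^ k - 1 : Int)).toNat = 2 ^ k - 1 := by
    have : ((2 ^ k : Nat) : Int) = (2 : Int) ^ k := by push_cast; ring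
    omega
  unfold PySem.Int.band
  by_cases ha : 0 ≤ a
  · rw [if_pos ha, if_pos (by omega : (0 : Int) ≤ 2 ^ k - 1)]
    rw [hcast, Nat.and_two_pow_sub_one_eq_mod]
    push_cast
    rw [Int.toNat_of_nonneg ha]
  · rw [if_neg ha, if_pos (by omega : (0 : Int) ≤ 2 ^ k - 1)]
    rw [hcast, Nat.land_comm, Nat.and_two_pow_sub_one_eq_mod]
    set b : Nat := (-a - 1).toNat with hb
    have hab : a = -1 - (b : Int) := by omega
    have hrlt : b % 2 ^ k < 2 ^ k := Nat.mod_lt _ (by positivity)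
    have hc2 : ((2 ^ k : Nat) : Int) = (2 : Int) ^ k := by push_cast; ring
    have hbm : ((b % 2 ^ k : Nat) : Int) = (b : Int) % (2 : Int) ^ k := by
      push_cast; ring
    have h1 : 0 ≤ (b : Int) % (2 : Int) ^ k := Int.emod_nonneg _ (by positivity)
    have h2 : (b : Int) % (2 : Int) ^ k < (2 : Int) ^ k := Int.emod_lt_of_pos _ hpow
    have hmod : a % (2 : Int) ^ k = (2 : Int) ^ k - 1 - (b : Int) % (2 : Int) ^ k := by
      have hbd : (b : Int) % (2 : Int) ^ k = (b : Int) - (2 : Int) ^ k * ((b : Int) / (2 : Int) ^ k) := by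
        rw [Int.emod_def]
      have heq : a = ((2 : Int) ^ k - 1 - (b : Int) % (2 : Int) ^ k)
          + (2 : Int) ^ k * (-((b : Int) / (2 : Int) ^ k) - 1) := by
        rw [hab]; rw [hbd]; ring
      rw [heq, Int.add_mul_emod_self_left]
      exact Int.emod_eq_of_lt (by omega) (by omega)
    rw [hmod]
    omega

theorem pv_shr (a : Int) (k : Nat) : a >>> k = a / (2 : Int) ^ k := by
  rw [Int.shiftRight_eq_div_pow]; push_cast; ring_nf

theorem pv_bor_nonneg {a b : Int} (ha : 0 ≤ a) (hb : 0 ≤ b) : 0 ≤ PySem.Int.bor a b := by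
  rw [PySem.Int.bor_of_nonneg ha hb]; positivity

theorem pv_bor_assoc {a b c : Int} (ha : 0 ≤ a) (hb : 0 ≤ b) (hc : 0 ≤ c) :
    PySem.Int.bor (PySem.Int.bor a b) c = PySem.Int.bor a (PySem.Int.bor b c) := by
  rw [PySem.Int.bor_of_nonneg ha hb, PySem.Int.bor_of_nonneg hb hc,
    PySem.Int.bor_of_nonneg (by positivity) hc, PySem.Int.bor_of_nonneg ha (by positivity)]
  simp [Nat.or_assoc]

theorem pv_foldl_bor_nonneg (h : Nat → Int) (hh : ∀ x, 0 ≤ h x) :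
    ∀ (l : List Nat) (s : Int), 0 ≤ s →
      0 ≤ List.foldl (fun a x => PySem.Int.bor a (h x)) s l := by
  intro l
  induction l with
  | nil => intro s hs; simpa using hs
  | cons x l ih => intro s hs; exact ih _ (pv_bor_nonneg hs (hh x))

theorem pv_foldl_bor (h : Nat → Int) (hh : ∀ x, 0 ≤ h x) :
    ∀ (l : List Nat) (s : Int), 0 ≤ s →
      List.foldl (fun a x => PySem.Int.bor a (h x)) s l
        = PySem.Int.bor s (List.foldl (fun a x => PySem.Int.bor a (h x)) 0 l) := by
  intro l
  induction l with
  | nil => intro s hs; simp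
  | cons x l ih =>
    intro s hs
    have h0 : PySem.Int.bor (0 : Int) (h x) = h x := by
      rw [PySem.Int.bor_comm]; simp
    simp only [List.foldl_cons, h0]
    rw [ih _ (pv_bor_nonneg hs (hh x)), ih _ (hh x)]
    exact pv_bor_assoc hs (hh x) (pv_foldl_bor_nonneg h hh l 0 le_rfl)

theorem pv_bor_disjoint (x y : Int) (m : Nat) (hx : 0 ≤ x) (hy0 : 0 ≤ y) (hy : y < 2 ^ m) :
    PySem.Int.bor (x * 2 ^ m) y = x * 2 ^ m + y := by
  have hxm : (0 : Int) ≤ x * 2 ^ m := by positivity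
  rw [PySem.Int.bor_of_nonneg hxm hy0]
  have h2m : ((2 : Int) ^ m).toNat = 2 ^ m := by
    have : ((2 ^ m : Nat) : Int) = (2 : Int) ^ m := by push_cast; ring
    omega
  have h1 : (x * 2 ^ m).toNat = x.toNat * 2 ^ m := by
    rw [Int.toNat_mul hx (by positivity), h2m]
  have hylt : y.toNat < 2 ^ m := by
    have : ((2 ^ m : Nat) : Int) = (2 : Int) ^ m := by push_cast; ring
    omega
  have := Nat.shiftLeft_add_eq_or_of_lt hylt x.toNat
  rw [Nat.shiftLeft_eq] at this
  rw [h1, ← this]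
  have : ((x.toNat * 2 ^ m + y.toNat : Nat) : Int) = (x.toNat : Int) * ((2 ^ m : Nat) : Int) + (y.toNat : Int) := by push_cast; ring
  rw [this]
  have hc : ((2 ^ m : Nat) : Int) = (2 : Int) ^ m := by push_cast; ring
  omega

-- bounds for the per-byte transform (g is id or pvNibbleSwap in this file)
def pvByteF (g : Int → Int) : Prop := ∀ b : Int, 0 ≤ b → b < 256 → 0 ≤ g b ∧ g b < 256

theorem pvNibbleSwap_bounds (b : Int) : 0 ≤ pvNibbleSwap b ∧ pvNibbleSwap b < 256 := by
  unfold pvNibbleSwap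
  have h : (0xFF : Int) = (2 : Int) ^ 8 - 1 := by norm_num
  rw [h, pv_band_mask]
  exact ⟨Int.emod_nonneg _ (by positivity), Int.emod_lt_of_pos _ (by positivity)⟩

theorem pvS_bounds (g : Int → Int) (hg : pvByteF g) :
    ∀ (n : Nat) (m : Int), 0 ≤ pvS g n m ∧ pvS g n m < 256 ^ n := by
  intro n
  induction n with
  | zero => intro m; simp [pvS]
  | succ n ih =>
    intro m
    have hb := hg (m % 256) (Int.emod_nonneg _ (by norm_num)) (Int.emod_lt_of_pos _ (by norm_num))
    have := ih (m / 256)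
    have hp : (0 : Int) < 256 ^ n := by positivity
    simp only [pvS]
    constructor
    · have : 0 ≤ g (m % 256) * 256 ^ n := mul_nonneg hb.1 (le_of_lt hp)
      omega
    · have h1 : g (m % 256) * 256 ^ n ≤ 255 * 256 ^ n := by
        apply mul_le_mul_of_nonneg_right _ (le_of_lt hp)
        omega
      have h2 : (256 : Int) ^ (n + 1) = 256 * 256 ^ n := by ring
      omega

theorem pv_pow256 (n : Nat) : (256 : Int) ^ n = 2 ^ (8 * n) := by
  rw [pow_mul]; norm_num

theorem pv_shrI (a : Int) (m : Nat) : a >>> ((m : Int)) = a / (2 : Int) ^ m := by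
  rw [Int.shiftRight_natCast_right, pv_shr]

theorem pv_band255 (a : Int) : PySem.Int.band a 255 = a % 256 := by
  have h : (255 : Int) = (2 : Int) ^ 8 - 1 := by norm_num
  have h2 : ((2 : Int) ^ 8) = 256 := by norm_num
  rw [h, pv_band_mask, h2]

theorem pv_byte_bounds (a : Int) : 0 ≤ a % (256 : Int) ∧ a % (256 : Int) < 256 :=
  ⟨Int.emod_nonneg _ (by norm_num), Int.emod_lt_of_pos _ (by norm_num)⟩

-- the A-side loop computes pvS
theorem pvA_eq (g : Int → Int) (hg : pvByteF g) :
    ∀ (n : Nat) (orig : Int),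
      List.foldl
        (fun a (k : Nat) =>
          PySem.Int.bor a
            (g (PySem.Int.band (orig >>> ((((k * 8 : Nat)) : Int))) 255)
              <<< ((n - 1 - k) * 8 : Nat)))
        0 (List.range n)
      = pvS g n orig := by
  intro n
  induction n with
  | zero => intro orig; simp [pvS]
  | succ n ih =>
    intro orig
    have hterm : ∀ k : Nat,
        (0:Int) ≤ g (PySem.Int.band (orig >>> (((k * 8 : Nat)) : Int)) 255)
          <<< ((n + 1 - 1 - k) * 8 : Nat) := by
      intro k
      rw [Int.shiftLeft_eq, pv_band255]
      exact mul_nonneg (hg _ (pv_byte_bounds _).1 (pv_byte_bounds _).2).1 (by positivity)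
    rw [List.range_succ_eq_map, List.foldl_cons, List.foldl_map]
    have hstep : ∀ (a : Int) (k : Nat),
        PySem.Int.bor a
            (g (PySem.Int.band (orig >>> (((Nat.succ k * 8 : Nat)) : Int)) 255)
              <<< ((n + 1 - 1 - Nat.succ k) * 8 : Nat))
          = PySem.Int.bor a
            (g (PySem.Int.band ((orig / 256) >>> (((k * 8 : Nat)) : Int)) 255)
              <<< ((n - 1 - k) * 8 : Nat)) := by
      intro a k
      have hshift : orig >>> (((Nat.succ k * 8 : Nat)) : Int)
          = (orig / 256) >>> (((k * 8 : Nat)) : Int) := by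
        rw [pv_shrI, pv_shrI]
        have h256 : (256 : Int) = (2 : Int) ^ 8 := by norm_num
        rw [h256, Int.ediv_ediv_of_nonneg (by positivity), ← pow_add]
        congr 2
        omega
      have hlane : n + 1 - 1 - Nat.succ k = n - 1 - k := by omega
      rw [hshift, hlane]
    rw [PySem.List.foldl_congr_mem _ _ _ _ (fun a k _ => hstep a k)]
    have hpull := pv_foldl_bor
      (fun k => g (PySem.Int.band ((orig / 256) >>> (((k * 8 : Nat)) : Int)) 255)
        <<< ((n - 1 - k) * 8 : Nat))
      (fun k => by
        show (0:Int) ≤ g (PySem.Int.band ((orig / 256) >>> (((k * 8 : Nat)) : Int)) 255)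
          <<< ((n - 1 - k) * 8 : Nat)
        rw [Int.shiftLeft_eq, pv_band255]
        exact mul_nonneg (hg _ (pv_byte_bounds _).1 (pv_byte_bounds _).2).1 (by positivity))
      (List.range n)
    rw [hpull _ (pv_bor_nonneg le_rfl (hterm 0))]
    rw [ih (orig / 256)]
    -- head term
    have hb0 : PySem.Int.bor (0:Int)
          (g (PySem.Int.band (orig >>> ((((0 * 8 : Nat)) : Int))) 255)
            <<< ((n + 1 - 1 - 0) * 8 : Nat))
        = g (orig % 256) * 2 ^ (8 * n) := by
      have e2 : (n + 1 - 1 - 0) * 8 = n * 8 := by omega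
      rw [PySem.Int.bor_comm, PySem.Int.bor_zero, e2, Int.shiftLeft_eq]
      rw [show ((0 * 8 : Nat) : Int) = ((0 : Nat) : Int) from by norm_num]
      rw [pv_shrI, pow_zero, Int.ediv_one, pv_band255]
      rw [show (2 : Int) ^ (n * 8) = 2 ^ (8 * n) from by rw [Nat.mul_comm]]
    rw [hb0]
    have hgb := hg (orig % 256) (pv_byte_bounds orig).1 (pv_byte_bounds orig).2
    have hSb := pvS_bounds g hg n (orig / 256)
    have hdisj := pv_bor_disjoint (g (orig % 256)) (pvS g n (orig / 256)) (8 * n)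
      hgb.1 hSb.1 (by rw [← pv_pow256]; exact hSb.2)
    rw [hdisj, pvS, pv_pow256]

-- the B-side buffer computes pvS
theorem pvToBytesLE_length (n : Nat) : ∀ m : Int, (pvToBytesLE n m).length = n := by
  induction n with
  | zero => intro m; simp [pvToBytesLE]
  | succ n ih => intro m; simp [pvToBytesLE, ih]

theorem pvFromBytesLE_append (l : List Int) (x : Int) :
    pvFromBytesLE (l ++ [x]) = pvFromBytesLE l + 256 ^ l.length * x := by
  induction l with
  | nil => simp [pvFromBytesLE]
  | cons b bs ih => simp [pvFromBytesLE, ih]; ring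

theorem pvB_eq (g : Int → Int) :
    ∀ (n : Nat) (m : Int),
      pvFromBytesLE ((pvToBytesLE n m).reverse.map g) = pvS g n m := by
  intro n
  induction n with
  | zero => intro m; simp [pvToBytesLE, pvFromBytesLE, pvS]
  | succ n ih =>
    intro m
    have hmod : PySem.Int.mod m 256 = m % 256 := PySem.Int.mod_eq_emod_of_pos (by norm_num)
    have hdiv : PySem.Int.floordiv m 256 = m / 256 := PySem.Int.floordiv_eq_ediv_of_pos (by norm_num)
    simp only [pvToBytesLE, hmod, hdiv, List.reverse_cons, List.map_append, List.map_cons,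
      List.map_nil]
    rw [pvFromBytesLE_append, ih]
    simp only [List.length_map, List.length_reverse, pvToBytesLE_length]
    simp only [pvS]
    ring

-- masking to the low 8n bits does not change pvS
theorem pv_emod_div (a : Int) (k : Nat) :
    a % ((2 : Int) ^ (k + 8)) / 256 = (a / 256) % (2 : Int) ^ k := by
  have h256 : ((2 : Int) ^ (k + 8)) = 256 * (2 : Int) ^ k := by rw [pow_add]; ring
  set q := a / (2 : Int) ^ (k + 8) with hq
  set r := a % (2 : Int) ^ (k + 8) with hr
  have ha : a = (2 : Int) ^ (k + 8) * q + r := by linarith [Int.emod_add_mul_ediv a ((2 : Int) ^ (k + 8))]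
  have hr0 : 0 ≤ r := Int.emod_nonneg _ (by positivity)
  have hrlt : r < (2 : Int) ^ (k + 8) := Int.emod_lt_of_pos _ (by positivity)
  have hdivq : a / 256 = r / 256 + (2 : Int) ^ k * q := by
    rw [ha, h256]
    rw [show 256 * (2:Int)^k * q + r = r + 256 * ((2:Int)^k * q) by ring]
    rw [Int.add_mul_ediv_left _ _ (by norm_num : (256:Int) ≠ 0)]
  have hrdiv0 : 0 ≤ r / 256 := Int.ediv_nonneg hr0 (by norm_num)
  have hrdivlt : r / 256 < (2 : Int) ^ k := by
    rw [Int.ediv_lt_iff_lt_mul (by norm_num : (0:Int) < 256)]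
    rw [h256] at hrlt
    omega
  rw [hdivq, Int.add_mul_emod_self_left]
  exact (Int.emod_eq_of_lt hrdiv0 hrdivlt).symm

theorem pvS_emod (g : Int → Int) :
    ∀ (n : Nat) (m : Int), pvS g n (m % (2 : Int) ^ (8 * n)) = pvS g n m := by
  intro n
  induction n with
  | zero => intro m; simp [pvS]
  | succ n ih =>
    intro m
    have hpow : (8 * (n + 1)) = 8 * n + 8 := by omega
    simp only [pvS]
    have h1 : m % (2 : Int) ^ (8 * (n + 1)) % 256 = m % 256 := by
      apply Int.emod_emod_of_dvd
      exact ⟨(2 : Int) ^ (8 * n), by rw [hpow, pow_add]; norm_num [mul_comm]⟩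
    have h2 : m % (2 : Int) ^ (8 * (n + 1)) / 256 = (m / 256) % (2 : Int) ^ (8 * n) := by
      rw [hpow]; exact pv_emod_div m (8 * n)
    rw [h1, h2, ih]

-- ===== VERDICT (by name: the statement is the Claim_ definition above) =====
theorem swap_bytes_spec : Claim_equal_swap_bytes := by
  intro width orig swap_nibbles _
  unfold Spec_swap_bytes swap_bytes swap_bytes_alt
  dsimp only
  set nb : Int := -(PySem.Int.floordiv (-width) 8) with hnb
  by_cases hle : nb ≤ 0
  · rw [if_pos hle]
    have hempty : PySem.List.pyRange 0 nb 1 = [] := by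
      rcases (by omega : nb = ((nb.toNat : Nat) : Int) ∨ nb < 0) with h | h
      · rw [show nb = ((0 : Nat) : Int) by omega, PySem.List.pyRange_zero_natCast]
        simp
      · simp only [PySem.List.pyRange]
        rw [if_neg (by norm_num : (1:Int) ≠ 0)]
        rw [if_pos (by norm_num : (0:Int) < 1), if_neg (by omega : ¬ (0:Int) < nb)]
        simp
    rw [hempty]
    simp
  · rw [if_neg hle]
    set n : Nat := nb.toNat with hn
    have hnbn : nb = (n : Int) := by omega
    set g : Int → Int := fun b => if swap_nibbles then pvNibbleSwap b else b with hgdef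
    have hg : pvByteF g := by
      intro b h1 h2
      simp only [hgdef]
      split
      · exact pvNibbleSwap_bounds b
      · exact ⟨h1, h2⟩
    -- A side
    rw [hnbn, PySem.List.pyRange_zero_natCast, List.foldl_map]
    rw [PySem.List.foldl_congr_mem _ _
      (fun a (k : Nat) =>
        PySem.Int.bor a
          (g (PySem.Int.band (orig >>> ((((k * 8 : Nat)) : Int))) 255)
            <<< ((n - 1 - k) * 8 : Nat))) _
      (by
        intro a k hk
        have hklt : k < n := List.mem_range.mp hk
        dsimp only
        have h1 : (((k : Int)) * 8).toNat = k * 8 := by omega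
        have h2 : ((((n : Nat) : Int) - ((k : Nat) : Int) - 1) * 8).toNat = (n - 1 - k) * 8 := by
          omega
        rw [h1, h2]
        cases swap_nibbles <;> rfl)]
    rw [pvA_eq g hg n orig]
    -- B side
    have hmasked : PySem.Int.band orig (((1 : Int) <<< ((8 * ((n : Nat) : Int)).toNat)) - 1)
        = orig % (2 : Int) ^ (8 * n) := by
      have hsh : ((8 * ((n : Nat) : Int)).toNat) = 8 * n := by omega
      rw [hsh, Int.shiftLeft_eq, one_mul]
      exact pv_band_mask orig (8 * n)
    rw [hmasked]
    by_cases hs : swap_nibbles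
    · rw [if_pos hs]
      rw [show (pvToBytesLE n (orig % (2:Int)^(8*n))).reverse.map pvNibbleSwap
            = (pvToBytesLE n (orig % (2:Int)^(8*n))).reverse.map g by
        simp [hgdef, hs]]
      rw [pvB_eq g n, pvS_emod]
    · rw [if_neg hs]
      rw [show (pvToBytesLE n (orig % (2:Int)^(8*n))).reverse
            = (pvToBytesLE n (orig % (2:Int)^(8*n))).reverse.map g by
        simp [hgdef, hs]]
      rw [pvB_eq g n, pvS_emod]
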